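-- pv_equiv track=rewrite | github.com/swapnilb17/videosrn_new | backend/app/services/script_openai.py | _merge_text_groups
-- ===== SOURCE A (Python) =====
-- def _merge_text_groups(lines: list[str], k: int) -> list[str]:
--     n = len(lines)
--     if n <= k:
--         return lines
--     out: list[str] = []
--     start = 0
--     for i in range(k):
--         end = (n * (i + 1)) // k
--         chunk = " ".join(lines[start:end]).strip()
--         if chunk:
--             out.append(chunk)
--         start = end
--     while len(out) < 2:
--         out.append(out[-1] if out else "Key point.")
--     return out[:8]
-- ===== SOURCE B (Python) =====
-- def _merge_text_groups(lines: list[str], k: int) -> list[str]: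
--     n = len(lines)
--     if n <= k:
--         return lines
--     out: list[str] = []
--     if k > 0:
--         buckets: list[list[str]] = [[] for _ in range(k)]
--         for j, line in enumerate(lines):
--             buckets[((j + 1) * k - 1) // n].append(line)
--         for b in buckets:
--             chunk = " ".join(b).strip()
--             if chunk:
--                 out.append(chunk)
--     while len(out) < 2:
--         out.append(out[-1] if out else "Key point.")
--     return out[:8]
-- ===== Notes on version B (the rewrite author's own statement) =====
-- stated objective: alternative
-- what changed: Instead of slicing the list per chunk with threaded start/end boundary arithmetic, B distributes each line once into k buckets keyed by ((j+1)*k-1)//n and then joins the buckets in order.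
import Mathlib
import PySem

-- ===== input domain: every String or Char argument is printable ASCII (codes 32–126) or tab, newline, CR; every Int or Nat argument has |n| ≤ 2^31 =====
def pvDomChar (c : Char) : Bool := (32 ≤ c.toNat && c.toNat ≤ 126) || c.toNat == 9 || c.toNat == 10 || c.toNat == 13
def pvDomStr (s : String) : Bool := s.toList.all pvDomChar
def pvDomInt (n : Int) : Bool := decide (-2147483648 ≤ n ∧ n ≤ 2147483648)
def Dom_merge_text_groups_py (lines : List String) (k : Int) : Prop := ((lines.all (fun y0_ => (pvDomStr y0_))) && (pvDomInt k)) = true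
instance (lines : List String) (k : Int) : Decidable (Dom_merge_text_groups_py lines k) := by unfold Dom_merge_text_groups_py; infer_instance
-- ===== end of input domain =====

-- B replaces A's per-chunk slicing loop (index arithmetic + start threading) by distributing
-- each line once into k buckets keyed by ((j+1)*k-1)//n and joining the buckets; objective: alternative decomposition, same cost.

-- shared helper: the literal `while len(out) < 2: out.append(out[-1] if out else "Key point.")`
-- (identical in both Pythons, so both ports use it)
def pvPadTwo (out : List String) : List String :=
  if _h : out.length < 2 then
    pvPadTwo (out ++ [if out = [] then "Key point." else (PySem.List.pyGet? out (-1)).getD ""])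
  else out
termination_by 2 - out.length
decreasing_by simp [List.length_append]; omega

-- ===== PORT A =====
def merge_text_groups_py (lines : List String) (k : Int) : List String :=
  let n : Int := lines.length
  if n ≤ k then lines
  else
    let st := (PySem.List.pyRange 0 k 1).foldl
      (fun (st : List String × Int) i =>
        let e := PySem.Int.floordiv (n * (i + 1)) k
        let chunk := PySem.Str.strip (PySem.Str.join " " (PySem.List.slice lines (some st.2) (some e)))
        (if chunk ≠ "" then st.1 ++ [chunk] else st.1, e))
      ([], 0)
    PySem.List.slice (pvPadTwo st.1) none (some 8)

-- ===== PORT B =====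
def merge_text_groups_py_alt (lines : List String) (k : Int) : List String :=
  let n : Int := lines.length
  if n ≤ k then lines
  else
    let out : List String :=
      if 0 < k then
        let buckets :=
          (PySem.List.enumerate lines).foldl
            (fun (bs : List (List String)) p =>
              bs.modify (PySem.Int.floordiv ((p.1 + 1) * k - 1) n).toNat (fun b => b ++ [p.2]))
            (List.replicate k.toNat [])
        buckets.foldl
          (fun out b =>
            let chunk := PySem.Str.strip (PySem.Str.join " " b)
            if chunk ≠ "" then out ++ [chunk] else out)
          []
      else []
    PySem.List.slice (pvPadTwo out) none (some 8)

-- ===== PRECONDITION & SPEC =====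
def Spec_merge_text_groups_py (lines : List String) (k : Int) (out : List String) : Prop := out = merge_text_groups_py_alt lines k
instance (lines : List String) (k : Int) (out : List String) : Decidable (Spec_merge_text_groups_py lines k out) := by unfold Spec_merge_text_groups_py; infer_instance

-- ===== CLAIM (what is proved, stated in full; the proofs are below) =====
def Claim_equal_merge_text_groups_py : Prop := ∀ (lines : List String) (k : Int), Dom_merge_text_groups_py lines k → Spec_merge_text_groups_py lines k (merge_text_groups_py lines k)

-- ===== LEMMAS AND PROOFS =====

-- boundary of chunk i (Nat form): n*i//k
def pvLo (nn kk i : Nat) : Nat := nn * i / kk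
-- the contiguous chunks lines[lo i : lo (i+1)] for i < kk, computed on a prefix xs of lines
def pvChunks (xs : List String) (nn kk : Nat) : List (List String) :=
  (List.range kk).map (fun i => (xs.drop (pvLo nn kk i)).take (pvLo nn kk (i + 1) - pvLo nn kk i))
-- the shared emit step
def pvEmit (out : List String) (b : List String) : List String :=
  let chunk := PySem.Str.strip (PySem.Str.join " " b)
  if chunk ≠ "" then out ++ [chunk] else out
-- bucket index of line j
def pvIdx (nn kk j : Nat) : Nat := ((j + 1) * kk - 1) / nn

lemma pvLo_mono (nn kk : Nat) {i j : Nat} (h : i ≤ j) : pvLo nn kk i ≤ pvLo nn kk j :=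
  Nat.div_le_div_right (Nat.mul_le_mul_left nn h)

lemma pvIdx_spec (nn kk m : Nat) (hk : 0 < kk) (hm : m < nn) :
    pvLo nn kk (pvIdx nn kk m) ≤ m ∧ m < pvLo nn kk (pvIdx nn kk m + 1) := by
  have hn : 0 < nn := lt_of_le_of_lt (Nat.zero_le _) hm
  have h1 : 1 ≤ (m + 1) * kk := Nat.one_le_iff_ne_zero.mpr (by positivity)
  constructor
  · -- nn * idx / kk ≤ m  ⟸  nn * idx < (m+1) * kk
    simp only [pvLo]
    have hlt : nn * pvIdx nn kk m < (m + 1) * kk := by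
      have hdm : pvIdx nn kk m * nn ≤ (m + 1) * kk - 1 := Nat.div_mul_le_self _ _
      calc nn * pvIdx nn kk m = pvIdx nn kk m * nn := Nat.mul_comm _ _
        _ ≤ (m + 1) * kk - 1 := hdm
        _ < (m + 1) * kk := by omega
    have := (Nat.div_lt_iff_lt_mul hk).mpr hlt
    omega
  · -- m + 1 ≤ nn * (idx + 1) / kk  ⟸  (m+1) * kk ≤ nn * (idx+1)
    have hlt : (m + 1) * kk - 1 < (pvIdx nn kk m + 1) * nn :=
      (Nat.div_lt_iff_lt_mul hn).mp (Nat.lt_succ_self _)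
    have hle : (m + 1) * kk ≤ nn * (pvIdx nn kk m + 1) := by
      have : (pvIdx nn kk m + 1) * nn = nn * (pvIdx nn kk m + 1) := Nat.mul_comm _ _
      omega
    simp only [pvLo]
    exact Nat.lt_of_succ_le ((Nat.le_div_iff_mul_le hk).mpr hle)

-- inserting line m (= the current prefix length) into its bucket extends the chunk decomposition
lemma pvChunks_step (pref : List String) (x : String) (nn kk : Nat)
    (hk : 0 < kk) (hm : pref.length < nn) :
    (pvChunks pref nn kk).modify (pvIdx nn kk pref.length) (fun b => b ++ [x])
      = pvChunks (pref ++ [x]) nn kk := by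
  set m := pref.length with hmdef
  apply List.ext_getElem
  · simp [pvChunks, List.length_modify]
  · intro i hi _
    have hik : i < kk := by simpa [pvChunks, List.length_modify] using hi
    rw [List.getElem_modify]
    have hgi : ∀ (xs : List String) (h : i < (pvChunks xs nn kk).length),
        (pvChunks xs nn kk)[i] = (xs.drop (pvLo nn kk i)).take (pvLo nn kk (i+1) - pvLo nn kk i) := by
      intro xs h
      simp [pvChunks]
    rw [hgi, hgi]
    obtain ⟨hlo, hhi⟩ := pvIdx_spec nn kk m hk hm
    have hmono : pvLo nn kk i ≤ pvLo nn kk (i + 1) := pvLo_mono nn kk (Nat.le_succ i)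
    by_cases hcase : pvIdx nn kk m = i
    · -- the target bucket: lo i ≤ m < lo (i+1); the new element lands at the end
      rw [if_pos hcase]
      rw [hcase] at hlo hhi
      rw [List.drop_append_of_le_length (by omega)]
      have hlen : (pref.drop (pvLo nn kk i)).length = m - pvLo nn kk i := by simp [hmdef]
      rw [List.take_of_length_le (by simp [hlen]; omega),
          List.take_of_length_le (by simp [hlen]; omega)]
    · -- other buckets are unchanged: the interval [lo i, lo (i+1)) misses position m
      rw [if_neg hcase]
      rcases Nat.lt_or_ge i (pvIdx nn kk m) with hlt | hge
      · -- i before the target: lo (i+1) ≤ lo (idx) ≤ m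
        have h1 : i + 1 ≤ pvIdx nn kk m := hlt
        have h2 : pvLo nn kk (i + 1) ≤ m := le_trans (pvLo_mono nn kk h1) hlo
        rw [List.drop_append_of_le_length (by omega),
            List.take_append_of_le_length (by simp; omega)]
      · -- i after the target: m + 1 ≤ lo (idx + 1) ≤ lo i, both drops are empty
        have hgt : pvIdx nn kk m < i := lt_of_le_of_ne hge hcase
        have h2 : m + 1 ≤ pvLo nn kk i := le_trans hhi (pvLo_mono nn kk hgt)
        rw [List.drop_eq_nil_of_le (by omega), List.drop_eq_nil_of_le (by simp; omega)]

-- B's bucket-filling fold computes pvChunks of the full list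
lemma pvBuckets_fold (lines : List String) (nn kk : Nat) (hk : 0 < kk)
    (hnn : nn = lines.length) :
    ∀ (suf pref : List String), pref ++ suf = lines →
      (PySem.List.enumerate suf (pref.length : Int)).foldl
        (fun (bs : List (List String)) p =>
          bs.modify (PySem.Int.floordiv ((p.1 + 1) * (kk : Int) - 1) (nn : Int)).toNat
            (fun b => b ++ [p.2]))
        (pvChunks pref nn kk)
      = pvChunks lines nn kk := by
  intro suf
  induction suf with
  | nil => intro pref h; simpa [PySem.List.enumerate] using congrArg (fun xs => pvChunks xs nn kk) (by simpa using h)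
  | cons x t ih =>
    intro pref h
    have hm : pref.length < nn := by
      have := congrArg List.length h
      simp [List.length_append] at this
      omega
    have hcast : ((pref.length : Int) + 1) * (kk : Int) - 1
        = (((pref.length + 1) * kk - 1 : Nat) : Int) := by
      have h1 : 1 ≤ (pref.length + 1) * kk := Nat.one_le_iff_ne_zero.mpr (by positivity)
      push_cast [h1]
      ring
    rw [PySem.List.enumerate_cons, List.foldl_cons]
    have : (PySem.Int.floordiv (((pref.length : Int) + 1) * (kk : Int) - 1) (nn : Int)).toNat
        = pvIdx nn kk pref.length := by
      rw [hcast, PySem.Int.floordiv_natCast, Int.toNat_natCast]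
      rfl
    rw [this, pvChunks_step pref x nn kk hk hm]
    have hlen : ((pref.length : Int) + 1) = (((pref ++ [x]).length : Nat) : Int) := by
      simp [List.length_append]
    rw [hlen]
    exact ih (pref ++ [x]) (by simpa using h)

-- A's slicing fold, with `start` threaded as the previous boundary, emits the same chunks
lemma pvAside_fold (lines : List String) (nn kk : Nat) :
    ∀ (r j : Nat) (out0 : List String) (s : Int), s = (pvLo nn kk j : Int) →
      ((List.range' j r).foldl
        (fun (st : List String × Int) (i : Nat) =>
          let e := PySem.Int.floordiv ((nn : Int) * ((i : Int) + 1)) (kk : Int)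
          let chunk := PySem.Str.strip (PySem.Str.join " " (PySem.List.slice lines (some st.2) (some e)))
          (if chunk ≠ "" then st.1 ++ [chunk] else st.1, e))
        (out0, s)).1
      = ((List.range' j r).map (fun i => (lines.drop (pvLo nn kk i)).take (pvLo nn kk (i + 1) - pvLo nn kk i))).foldl pvEmit out0 := by
  intro r
  induction r with
  | zero => intro j out0 s hs; simp
  | succ r ih =>
    intro j out0 s hs
    rw [List.range'_succ, List.foldl_cons, List.map_cons, List.foldl_cons, hs]
    have he : PySem.Int.floordiv ((nn : Int) * ((j : Nat) + 1 : Int)) (kk : Int) = (pvLo nn kk (j + 1) : Int) := by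
      have : ((nn : Int) * ((j : Nat) + 1 : Int)) = ((nn * (j + 1) : Nat) : Int) := by push_cast; ring
      rw [this, PySem.Int.floordiv_natCast]; rfl
    have hslice : PySem.List.slice lines (some (pvLo nn kk j : Int)) (some (pvLo nn kk (j + 1) : Int))
        = (lines.drop (pvLo nn kk j)).take (pvLo nn kk (j + 1) - pvLo nn kk j) :=
      PySem.List.slice_natCast lines _ _
    simp only [he, hslice]
    exact ih (j + 1) _ _ rfl

-- under the k > 0 branch the ranges agree and both programs compute pvEmit over pvChunks
lemma pvChunks_nil (nn kk : Nat) : pvChunks [] nn kk = List.replicate kk [] := by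
  apply List.ext_getElem <;> simp [pvChunks]

-- ===== VERDICT (by name: the statement is the Claim_ definition above) =====
theorem merge_text_groups_py_spec : Claim_equal_merge_text_groups_py := by
  intro lines k _
  show merge_text_groups_py lines k = merge_text_groups_py_alt lines k
  unfold merge_text_groups_py merge_text_groups_py_alt
  by_cases hnk : (lines.length : Int) ≤ k
  · simp [hnk]
  · simp only [if_neg hnk]
    by_cases hk : 0 < k
    · -- k > 0 < n : both sides reduce to folding pvEmit over pvChunks
      simp only [if_pos hk]
      set nn := lines.length with hnn
      have hkk : k = (k.toNat : Int) := (Int.toNat_of_nonneg (le_of_lt hk)).symm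
      set kk := k.toNat with hkkdef
      have hk' : 0 < kk := by omega
      congr 1
      -- A side
      have hA : ((PySem.List.pyRange 0 k 1).foldl
          (fun (st : List String × Int) i =>
            let e := PySem.Int.floordiv ((nn : Int) * (i + 1)) k
            let chunk := PySem.Str.strip (PySem.Str.join " " (PySem.List.slice lines (some st.2) (some e)))
            (if chunk ≠ "" then st.1 ++ [chunk] else st.1, e))
          ([], 0)).1
          = (pvChunks lines nn kk).foldl pvEmit [] := by
        have hr : ((kk : Int) - 0).toNat = kk := by omega
        rw [hkk, PySem.List.pyRange_one, List.foldl_map, hr]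
        simp only [zero_add]
        simp only [pvChunks, List.range_eq_range']
        exact pvAside_fold lines nn kk kk 0 [] 0 (by simp [pvLo])
      -- B side
      have hB : ((PySem.List.enumerate lines).foldl
          (fun (bs : List (List String)) p =>
            bs.modify (PySem.Int.floordiv ((p.1 + 1) * k - 1) (nn : Int)).toNat
              (fun b => b ++ [p.2]))
          (List.replicate kk []))
          = pvChunks lines nn kk := by
        have := pvBuckets_fold lines nn kk hk' rfl lines [] (by simp)
        rw [pvChunks_nil] at this
        rw [hkk]
        simpa using this
      rw [hA, hB]
      rfl
    · -- k ≤ 0 < n : A's range is empty, B skips the bucket branch; both emit nothing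
      have : PySem.List.pyRange 0 k 1 = [] := PySem.List.pyRange_one_eq_nil (by omega)
      simp [this, hk]
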